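-- pv_equiv track=rewrite | github.com/amanimran786/jarvis-ai | jarvis_cli.py | _shell_command_risk_reason
-- ===== SOURCE A (Python) =====
-- def _shell_command_risk_reason(command: str) -> str:
--     lower = (command or "").strip().lower()
--     if "sudo " in lower:
--         return "privileged command"
--     if any(marker in lower for marker in ("rm ", "mv ", "cp ", "chmod ", "chown ", "ln ", "tee ", ">", ">>")):
--         return "state-changing shell command"
--     if any(marker in lower for marker in ("git push", "git reset", "git clean")):
--         return "repo-changing command"
--     if any(marker in lower for marker in ("brew install", "brew uninstall", "pip install", "pip uninstall", "uv pip install", "npm install -g")):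
--         return "environment-changing command"
--     return "risky shell command"
-- ===== SOURCE B (Python) =====
-- _LABELS = ("privileged command", "state-changing shell command",
--            "repo-changing command", "environment-changing command")
--
-- _MARKERS = (
--     ("sudo ", 0),
--     ("rm ", 1), ("mv ", 1), ("cp ", 1), ("chmod ", 1), ("chown ", 1),
--     ("ln ", 1), ("tee ", 1), (">", 1), (">>", 1),
--     ("git push", 2), ("git reset", 2), ("git clean", 2),
--     ("brew install", 3), ("brew uninstall", 3), ("pip install", 3),
--     ("pip uninstall", 3), ("uv pip install", 3), ("npm install -g", 3),
-- )
--
-- def _shell_command_risk_reason(command: str) -> str: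
--     # Lexer-style single scan: walk the string once and, at each position,
--     # match markers in place, keeping the minimum severity seen so far.
--     lower = (command or "").strip().lower()
--     best = 4  # one past the least-severe class
--     for i in range(len(lower)):
--         for marker, severity in _MARKERS:
--             if severity < best and lower.startswith(marker, i):
--                 best = severity
--     return _LABELS[best] if best < 4 else "risky shell command"
-- ===== Notes on version B (the rewrite author's own statement) =====
-- stated objective: alternative
-- what changed: Replaces the ordered group-by-group substring-search cascade with a lexer-style single left-to-right scan over string positions that matches markers in place and tracks the minimum severity seen, returning the label of that minimum.
import Mathlib
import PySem

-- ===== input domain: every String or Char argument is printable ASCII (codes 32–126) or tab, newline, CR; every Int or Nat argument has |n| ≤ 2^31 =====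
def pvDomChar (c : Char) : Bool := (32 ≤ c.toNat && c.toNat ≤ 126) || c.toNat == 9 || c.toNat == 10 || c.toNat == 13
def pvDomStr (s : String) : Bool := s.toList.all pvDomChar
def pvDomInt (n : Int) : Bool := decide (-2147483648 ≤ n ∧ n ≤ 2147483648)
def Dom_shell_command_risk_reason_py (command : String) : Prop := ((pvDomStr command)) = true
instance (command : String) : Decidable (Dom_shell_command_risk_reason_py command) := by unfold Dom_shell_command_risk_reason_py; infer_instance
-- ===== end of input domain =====

set_option maxRecDepth 10000
set_option maxHeartbeats 1000000


-- B replaces A's ordered group-by-group substring cascade with a lexer-style single scan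
-- over string positions tracking the minimum severity matched (objective: alternative).

-- ===== PORT A =====
def shell_command_risk_reason_py (command : String) : String :=
  let lower := PySem.Str.lower (PySem.Str.strip command)
  if PySem.Str.isIn "sudo " lower then "privileged command"
  else if ["rm ", "mv ", "cp ", "chmod ", "chown ", "ln ", "tee ", ">", ">>"].any
      (fun marker => PySem.Str.isIn marker lower) then "state-changing shell command"
  else if ["git push", "git reset", "git clean"].any
      (fun marker => PySem.Str.isIn marker lower) then "repo-changing command"
  else if ["brew install", "brew uninstall", "pip install", "pip uninstall", "uv pip install", "npm install -g"].any
      (fun marker => PySem.Str.isIn marker lower) then "environment-changing command"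
  else "risky shell command"

-- ===== PORT B =====
def pvLabels : List String :=
  ["privileged command", "state-changing shell command",
   "repo-changing command", "environment-changing command"]

def pvMarkers : List (String × Nat) :=
  [("sudo ", 0),
   ("rm ", 1), ("mv ", 1), ("cp ", 1), ("chmod ", 1), ("chown ", 1),
   ("ln ", 1), ("tee ", 1), (">", 1), (">>", 1),
   ("git push", 2), ("git reset", 2), ("git clean", 2),
   ("brew install", 3), ("brew uninstall", 3), ("pip install", 3),
   ("pip uninstall", 3), ("uv pip install", 3), ("npm install -g", 3)]

-- inner loop of Source B: over the marker table, keep the least severity matching at position i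
def pvSel {α : Type} (w : α → Nat) (g : α → Bool) (l : List α) (b : Nat) : Nat :=
  l.foldl (fun b x => if w x < b ∧ g x = true then w x else b) b

-- outer loop of Source B: over the scan positions
def pvScan (L : List Char) : List Nat → Nat → Nat
  | [], best => best
  | i :: t, best =>
    pvScan L t
      (pvSel (fun mp => mp.2) (fun mp => PySem.Chars.startswith (L.drop i) mp.1.toList)
        pvMarkers best)

def shell_command_risk_reason_py_alt (command : String) : String :=
  let L := (PySem.Str.lower (PySem.Str.strip command)).toList
  let best := pvScan L (List.range L.length) 4
  if best < 4 then pvLabels.getD best "risky shell command" else "risky shell command"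

-- ===== PRECONDITION & SPEC =====
def Spec_shell_command_risk_reason_py (command : String) (out : String) : Prop := out = shell_command_risk_reason_py_alt command
instance (command : String) (out : String) : Decidable (Spec_shell_command_risk_reason_py command out) := by unfold Spec_shell_command_risk_reason_py; infer_instance

-- ===== CLAIM (what is proved, stated in full; the proofs are below) =====
def Claim_equal_shell_command_risk_reason_py : Prop := ∀ (command : String), Dom_shell_command_risk_reason_py command → Spec_shell_command_risk_reason_py command (shell_command_risk_reason_py command)

-- ===== LEMMAS AND PROOFS =====

theorem pvSel_cons {α : Type} (w : α → Nat) (g : α → Bool) (x : α) (t : List α) (b : Nat) :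
    pvSel w g (x :: t) b = pvSel w g t (if w x < b ∧ g x = true then w x else b) := rfl

theorem pvSel_le {α : Type} (w : α → Nat) (g : α → Bool) (l : List α) (b : Nat) :
    pvSel w g l b ≤ b := by
  induction l generalizing b with
  | nil => simp [pvSel]
  | cons x t ih =>
    rw [pvSel_cons]
    refine le_trans (ih _) ?_
    split_ifs with h
    · omega
    · exact le_rfl

theorem pvSel_le_of {α : Type} (w : α → Nat) (g : α → Bool) {x : α} {l : List α}
    (hx : x ∈ l) (hg : g x = true) (b : Nat) : pvSel w g l b ≤ w x := by
  induction l generalizing b with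
  | nil => cases hx
  | cons y t ih =>
    rw [pvSel_cons]
    rcases List.mem_cons.mp hx with h | h
    · subst h
      split_ifs with hcond
    
      · exact pvSel_le w g t (w x)
      · have hnb : ¬ w x < b := fun hlt => hcond ⟨hlt, hg⟩
        exact le_trans (pvSel_le w g t b) (by omega)
    · exact ih h _

theorem pvSel_cases {α : Type} (w : α → Nat) (g : α → Bool) (l : List α) (b : Nat) :
    pvSel w g l b = b ∨ ∃ x ∈ l, g x = true ∧ pvSel w g l b = w x := by
  induction l generalizing b with
  | nil => left; rfl
  | cons y t ih =>
    rw [pvSel_cons]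
    split_ifs with h
    · rcases ih (w y) with h1 | ⟨x, hx, hgx, he⟩
      · right; exact ⟨y, List.mem_cons_self, h.2, h1⟩
      · right; exact ⟨x, List.mem_cons_of_mem _ hx, hgx, he⟩
    · rcases ih b with h1 | ⟨x, hx, hgx, he⟩
      · left; exact h1
      · right; exact ⟨x, List.mem_cons_of_mem _ hx, hgx, he⟩

theorem pvScan_cons (L : List Char) (i : Nat) (t : List Nat) (b : Nat) :
    pvScan L (i :: t) b = pvScan L t
      (pvSel (fun mp => mp.2) (fun mp => PySem.Chars.startswith (L.drop i) mp.1.toList) pvMarkers b) := rfl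

theorem pvScan_le (L : List Char) (is : List Nat) (b : Nat) : pvScan L is b ≤ b := by
  induction is generalizing b with
  | nil => simp [pvScan]
  | cons i t ih =>
    rw [pvScan_cons]
    exact le_trans (ih _) (pvSel_le _ _ _ _)

theorem pvScan_le_of (L : List Char) {i : Nat} {is : List Nat} {x : String × Nat}
    (hi : i ∈ is) (hx : x ∈ pvMarkers)
    (hg : PySem.Chars.startswith (L.drop i) x.1.toList = true) (b : Nat) :
    pvScan L is b ≤ x.2 := by
  induction is generalizing b with
  | nil => cases hi
  | cons j t ih =>
    rw [pvScan_cons]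
    rcases List.mem_cons.mp hi with h | h
    · subst h
      exact le_trans (pvScan_le L t _) (pvSel_le_of _ _ hx hg b)
    · exact ih h _

theorem pvScan_cases (L : List Char) (is : List Nat) (b : Nat) :
    pvScan L is b = b ∨ ∃ i ∈ is, ∃ x ∈ pvMarkers,
      PySem.Chars.startswith (L.drop i) x.1.toList = true ∧ pvScan L is b = x.2 := by
  induction is generalizing b with
  | nil => left; rfl
  | cons j t ih =>
    rw [pvScan_cons]
    rcases pvSel_cases (fun mp => mp.2) (fun mp => PySem.Chars.startswith (L.drop j) mp.1.toList) pvMarkers b with h | ⟨x, hx, hgx, he⟩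
    · rw [h]
      rcases ih b with h1 | ⟨i, hi, x, hx, hgx, he⟩
      · left; exact h1
      · right; exact ⟨i, List.mem_cons_of_mem _ hi, x, hx, hgx, he⟩
    · rcases ih (pvSel (fun mp => mp.2) (fun mp => PySem.Chars.startswith (L.drop j) mp.1.toList) pvMarkers b) with h1 | ⟨i, hi, y, hy, hgy, he2⟩
      · right; exact ⟨j, List.mem_cons_self, x, hx, hgx, h1.trans he⟩
      · right; exact ⟨i, List.mem_cons_of_mem _ hi, y, hy, hgy, he2⟩

theorem pvMarkers_ne : ∀ x ∈ pvMarkers, x.1.toList ≠ [] := by decide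

theorem pvScan_le_iff (L : List Char) (k : Nat) (hk : k < 4) :
    pvScan L (List.range L.length) 4 ≤ k ↔
      ∃ x ∈ pvMarkers, x.2 ≤ k ∧ PySem.Chars.isIn x.1.toList L = true := by
  constructor
  · intro h
    rcases pvScan_cases L (List.range L.length) 4 with he | ⟨i, _, x, hx, hg, he⟩
    · omega
    · refine ⟨x, hx, by omega, ?_⟩
      have hpre : x.1.toList <+: L.drop i := (PySem.Chars.startswith_iff _ _).mp hg
      exact (PySem.Chars.exists_prefix_drop_iff_isIn _ _).mp ⟨i, hpre⟩
  · rintro ⟨x, hx, hk2, hin⟩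
    obtain ⟨j, hpre⟩ := (PySem.Chars.exists_prefix_drop_iff_isIn _ _).mpr hin
    have hj : j < L.length := by
      by_contra hge
      have hnil : L.drop j = [] := List.drop_eq_nil_iff.mpr (by omega)
      rw [hnil] at hpre
      exact pvMarkers_ne x hx (List.prefix_nil.mp hpre)
    exact le_trans (pvScan_le_of L (List.mem_range.mpr hj) hx
      ((PySem.Chars.startswith_iff _ _).mpr hpre) 4) hk2

theorem pvEx0 (L : List Char) :
    (∃ x ∈ pvMarkers, x.2 ≤ 0 ∧ PySem.Chars.isIn x.1.toList L = true) ↔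
      PySem.Chars.isIn "sudo ".toList L = true := by
  simp [pvMarkers]

theorem pvEx1 (L : List Char) :
    (∃ x ∈ pvMarkers, x.2 ≤ 1 ∧ PySem.Chars.isIn x.1.toList L = true) ↔
      (PySem.Chars.isIn "sudo ".toList L = true ∨
       ∃ m ∈ (["rm ", "mv ", "cp ", "chmod ", "chown ", "ln ", "tee ", ">", ">>"] : List String),
         PySem.Chars.isIn m.toList L = true) := by
  simp [pvMarkers]

theorem pvEx2 (L : List Char) :
    (∃ x ∈ pvMarkers, x.2 ≤ 2 ∧ PySem.Chars.isIn x.1.toList L = true) ↔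
      (PySem.Chars.isIn "sudo ".toList L = true ∨
       (∃ m ∈ (["rm ", "mv ", "cp ", "chmod ", "chown ", "ln ", "tee ", ">", ">>"] : List String),
         PySem.Chars.isIn m.toList L = true) ∨
       ∃ m ∈ (["git push", "git reset", "git clean"] : List String),
         PySem.Chars.isIn m.toList L = true) := by
  simp [pvMarkers]
  tauto

theorem pvEx3 (L : List Char) :
    (∃ x ∈ pvMarkers, x.2 ≤ 3 ∧ PySem.Chars.isIn x.1.toList L = true) ↔
      (PySem.Chars.isIn "sudo ".toList L = true ∨
       (∃ m ∈ (["rm ", "mv ", "cp ", "chmod ", "chown ", "ln ", "tee ", ">", ">>"] : List String),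
         PySem.Chars.isIn m.toList L = true) ∨
       (∃ m ∈ (["git push", "git reset", "git clean"] : List String),
         PySem.Chars.isIn m.toList L = true) ∨
       ∃ m ∈ (["brew install", "brew uninstall", "pip install", "pip uninstall", "uv pip install", "npm install -g"] : List String),
         PySem.Chars.isIn m.toList L = true) := by
  simp [pvMarkers]
  tauto

theorem pvMain (L : List Char) :
    (if PySem.Chars.isIn "sudo ".toList L = true then "privileged command"
     else if (["rm ", "mv ", "cp ", "chmod ", "chown ", "ln ", "tee ", ">", ">>"] : List String).any
         (fun marker => PySem.Chars.isIn marker.toList L) = true then "state-changing shell command"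
     else if (["git push", "git reset", "git clean"] : List String).any
         (fun marker => PySem.Chars.isIn marker.toList L) = true then "repo-changing command"
     else if (["brew install", "brew uninstall", "pip install", "pip uninstall", "uv pip install", "npm install -g"] : List String).any
         (fun marker => PySem.Chars.isIn marker.toList L) = true then "environment-changing command"
     else "risky shell command")
    = (if pvScan L (List.range L.length) 4 < 4
        then pvLabels.getD (pvScan L (List.range L.length) 4) "risky shell command"
        else "risky shell command") := by
  generalize hbest : pvScan L (List.range L.length) 4 = best
  have hiff : ∀ k : Nat, k < 4 →
      (best ≤ k ↔ ∃ x ∈ pvMarkers, x.2 ≤ k ∧ PySem.Chars.isIn x.1.toList L = true) := by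
    intro k hk
    rw [← hbest]
    exact pvScan_le_iff L k hk
  have hb4 : best ≤ 4 := by rw [← hbest]; exact pvScan_le L _ 4
  by_cases h0 : PySem.Chars.isIn "sudo ".toList L = true
  · have hb : best = 0 := Nat.le_zero.mp ((hiff 0 (by norm_num)).2 ((pvEx0 L).2 h0))
    rw [if_pos h0, hb]
    simp [pvLabels]
  · rw [if_neg h0]
    by_cases h1 : (["rm ", "mv ", "cp ", "chmod ", "chown ", "ln ", "tee ", ">", ">>"] : List String).any
        (fun marker => PySem.Chars.isIn marker.toList L) = true
    · have hb : best = 1 := by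
        have hle1 : best ≤ 1 := (hiff 1 (by norm_num)).2
          ((pvEx1 L).2 (Or.inr (by simpa using List.any_eq_true.mp h1)))
        have hgt : ¬ best ≤ 0 := fun hc => h0 ((pvEx0 L).1 ((hiff 0 (by norm_num)).1 hc))
        omega
      rw [if_pos h1, hb]
      simp [pvLabels]
    · rw [if_neg h1]
      by_cases h2 : (["git push", "git reset", "git clean"] : List String).any
          (fun marker => PySem.Chars.isIn marker.toList L) = true
      · have hb : best = 2 := by
          have hle2 : best ≤ 2 := (hiff 2 (by norm_num)).2
            ((pvEx2 L).2 (Or.inr (Or.inr (by simpa using List.any_eq_true.mp h2))))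
          have hgt : ¬ best ≤ 1 := by
            intro hc
            rcases (pvEx1 L).1 ((hiff 1 (by norm_num)).1 hc) with hc0 | hc1
            · exact h0 hc0
            · exact h1 (List.any_eq_true.mpr (by simpa using hc1))
          omega
        rw [if_pos h2, hb]
        simp [pvLabels]
      · rw [if_neg h2]
        by_cases h3 : (["brew install", "brew uninstall", "pip install", "pip uninstall", "uv pip install", "npm install -g"] : List String).any
            (fun marker => PySem.Chars.isIn marker.toList L) = true
        · have hb : best = 3 := by
            have hle3 : best ≤ 3 := (hiff 3 (by norm_num)).2
              ((pvEx3 L).2 (Or.inr (Or.inr (Or.inr (by simpa using List.any_eq_true.mp h3)))))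
            have hgt : ¬ best ≤ 2 := by
              intro hc
              rcases (pvEx2 L).1 ((hiff 2 (by norm_num)).1 hc) with hc0 | hc1 | hc2
              · exact h0 hc0
              · exact h1 (List.any_eq_true.mpr (by simpa using hc1))
              · exact h2 (List.any_eq_true.mpr (by simpa using hc2))
            omega
          rw [if_pos h3, hb]
          simp [pvLabels]
        · rw [if_neg h3]
          have hb : best = 4 := by
            have hgt : ¬ best ≤ 3 := by
              intro hc
              rcases (pvEx3 L).1 ((hiff 3 (by norm_num)).1 hc) with hc0 | hc1 | hc2 | hc3
              · exact h0 hc0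
              · exact h1 (List.any_eq_true.mpr (by simpa using hc1))
              · exact h2 (List.any_eq_true.mpr (by simpa using hc2))
              · exact h3 (List.any_eq_true.mpr (by simpa using hc3))
            omega
          rw [hb]
          simp

-- ===== VERDICT (by name: the statement is the Claim_ definition above) =====
theorem shell_command_risk_reason_py_spec : Claim_equal_shell_command_risk_reason_py := by
  intro command _
  unfold Spec_shell_command_risk_reason_py
  simp only [shell_command_risk_reason_py, shell_command_risk_reason_py_alt, PySem.Str.isIn_eq]
  exact pvMain ((PySem.Str.lower (PySem.Str.strip command)).toList)
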